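-- pv_equiv track=rewrite | github.com/inguin/aoc2024 | day21/keypad1.py | numeric_keypad
-- ===== SOURCE A (Python) =====
-- def numeric_keypad(code):
--     positions = {}
--     for row, keys in enumerate(('789', '456', '123', ' 0A')):
--         for col, key in enumerate(keys):
--             positions[key] = (row, col)
--
--     sequence = ''
--     pos = positions['A']
--
--     for key in code:
--         keypos = positions[key]
--         drow = keypos[0] - pos[0]
--         dcol = keypos[1] - pos[1]
--         if dcol < 0 and (pos[0] != 3 or keypos[1] != 0):
--             sequence += '<' * (-dcol)
--         if drow > 0 and (pos[1] != 0 or keypos[0] != 3):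
--             sequence += 'v' * drow
--         if dcol > 0:
--             sequence += '>' * dcol
--         if drow < 0:
--             sequence += '^' * (-drow)
--         if dcol < 0 and pos[0] == 3 and keypos[1] == 0:
--             sequence += '<' * (-dcol)
--         if drow > 0 and pos[1] == 0 and keypos[0] == 3:
--             sequence += 'v' * drow
--         sequence += 'A'
--         pos = keypos
--
--     return sequence
-- ===== SOURCE B (Python) =====
-- # Different mechanism: build the unordered bag of Manhattan moves for each transition and
-- # stably sort it by a gap-aware priority key (instead of six ordered conditional appends);
-- # consecutive keys are paired with zip instead of a prev-tracking loop.
--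
-- _POS = {k: (r, c)
--         for r, row in enumerate(('789', '456', '123', ' 0A'))
--         for c, k in enumerate(row)
--         if k != ' '}
--
--
-- def _walk(a, b):
--     (r0, c0), (r1, c1) = _POS[a], _POS[b]
--     moves = '<' * (c0 - c1) + 'v' * (r1 - r0) + '>' * (c1 - c0) + '^' * (r0 - r1)
--     rank = {'<': 0, 'v': 1, '>': 2, '^': 3}
--     if r0 == 3 and c1 == 0:      # a left sweep would cross the gap: lefts go last
--         rank['<'] = 4
--     if c0 == 0 and r1 == 3:      # a down sweep would cross the gap: downs go last
--         rank['v'] = 4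
--     return ''.join(sorted(moves, key=rank.get)) + 'A'
--
--
-- def numeric_keypad(code):
--     return ''.join(_walk(a, b) for a, b in zip('A' + code, code))
-- ===== Notes on version B (the rewrite author's own statement) =====
-- stated objective: alternative
-- what changed: Replaces the six ordered gap-aware conditional run-appends with building the unordered bag of Manhattan moves and stably sorting it by a gap-aware priority key, and pairs consecutive keys with zip('A'+code, code) instead of a prev-tracking loop over a growing string.
-- outside the precondition, e.g. on numeric_keypad(' '): A returns '<<A', B raises KeyError; on numeric_keypad('0 9'): A returns '<A<A>>^^^A', B raises KeyError
import Mathlib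
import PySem

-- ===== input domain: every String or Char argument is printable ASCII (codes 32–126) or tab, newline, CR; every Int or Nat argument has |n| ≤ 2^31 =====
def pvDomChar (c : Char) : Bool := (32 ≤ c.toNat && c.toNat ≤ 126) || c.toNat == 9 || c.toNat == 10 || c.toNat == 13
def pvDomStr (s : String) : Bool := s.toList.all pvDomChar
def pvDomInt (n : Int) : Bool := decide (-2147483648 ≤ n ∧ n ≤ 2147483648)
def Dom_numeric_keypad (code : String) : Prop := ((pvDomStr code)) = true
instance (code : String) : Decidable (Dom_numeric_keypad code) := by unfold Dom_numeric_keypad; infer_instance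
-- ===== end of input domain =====

-- B builds the unordered bag of Manhattan moves per transition and stably sorts it by a
-- gap-aware priority key, pairing consecutive keys with zip (objective: alternative).

-- ===== PORT A =====
-- positions dict built by the two enumerate loops, exactly as A does
def pvPositionsA : PySem.Dict Char (Int × Int) :=
  (PySem.List.enumerate [("789" : String), "456", "123", " 0A"]).foldl
    (fun d rk =>
      (PySem.List.enumerate rk.2.toList).foldl
        (fun d ck => d.insert ck.2 (rk.1, ck.1)) d)
    PySem.Dict.empty

-- one iteration of A's loop; the string is carried as List Char (Python's += on str)
def pvStepA (st : List Char × (Int × Int)) (key : Char) : List Char × (Int × Int) :=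
  let keypos := (pvPositionsA.get? key).getD (0, 0)
  let drow := keypos.1 - st.2.1
  let dcol := keypos.2 - st.2.2
  let s := st.1
  let s := if dcol < 0 ∧ (st.2.1 ≠ 3 ∨ keypos.2 ≠ 0) then s ++ List.replicate (-dcol).toNat '<' else s
  let s := if drow > 0 ∧ (st.2.2 ≠ 0 ∨ keypos.1 ≠ 3) then s ++ List.replicate drow.toNat 'v' else s
  let s := if dcol > 0 then s ++ List.replicate dcol.toNat '>' else s
  let s := if drow < 0 then s ++ List.replicate (-drow).toNat '^' else s
  let s := if dcol < 0 ∧ st.2.1 = 3 ∧ keypos.2 = 0 then s ++ List.replicate (-dcol).toNat '<' else s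
  let s := if drow > 0 ∧ st.2.2 = 0 ∧ keypos.1 = 3 then s ++ List.replicate drow.toNat 'v' else s
  (s ++ ['A'], keypos)

def numeric_keypad (code : String) : String :=
  String.ofList (code.toList.foldl pvStepA ([], (pvPositionsA.get? 'A').getD (0, 0))).1

-- ===== PORT B =====
-- _POS: same layout, built skipping the blank
def pvPosB : PySem.Dict Char (Int × Int) :=
  (PySem.List.enumerate [("789" : String), "456", "123", " 0A"]).foldl
    (fun d rk =>
      (PySem.List.enumerate rk.2.toList).foldl
        (fun d ck => if ck.2 ≠ ' ' then d.insert ck.2 (rk.1, ck.1) else d) d)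
    PySem.Dict.empty

-- _walk: the unordered move bag, stably sorted by the gap-aware rank
def pvWalkB (a b : Char) : List Char :=
  let p := (pvPosB.get? a).getD (0, 0)
  let q := (pvPosB.get? b).getD (0, 0)
  let moves := List.replicate (p.2 - q.2).toNat '<' ++ List.replicate (q.1 - p.1).toNat 'v'
            ++ List.replicate (q.2 - p.2).toNat '>' ++ List.replicate (p.1 - q.1).toNat '^'
  let rank : PySem.Dict Char Int := PySem.Dict.ofList [('<', 0), ('v', 1), ('>', 2), ('^', 3)]
  let rank := if p.1 = 3 ∧ q.2 = 0 then rank.insert '<' 4 else rank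
  let rank := if p.2 = 0 ∧ q.1 = 3 then rank.insert 'v' 4 else rank
  PySem.List.sorted moves (fun m => (rank.get? m).getD 0) false ++ ['A']

def numeric_keypad_alt (code : String) : String :=
  String.ofList (((('A' :: code.toList).zip code.toList).map (fun pr => pvWalkB pr.1 pr.2)).flatten)

-- ===== PRECONDITION & SPEC =====
def pvKeys : List Char := ['0', '1', '2', '3', '4', '5', '6', '7', '8', '9', 'A']

-- Pre_ excludes codes containing any character outside the 11 real keys: on other characters A
-- raises KeyError, except the layout blank ' ', where A's returned path (walking onto the forbidden
-- gap) is an artefact of building the position table from the layout strings; B raises KeyError there.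
def Pre_numeric_keypad (code : String) : Prop := (code.toList.all (· ∈ pvKeys)) = true
instance (code : String) : Decidable (Pre_numeric_keypad code) := by unfold Pre_numeric_keypad; infer_instance

def pvWitness_numeric_keypad : String := "029A"

def Spec_numeric_keypad (code : String) (out : String) : Prop := out = numeric_keypad_alt code
instance (code : String) (out : String) : Decidable (Spec_numeric_keypad code out) := by unfold Spec_numeric_keypad; infer_instance

-- ===== CLAIM (what is proved, stated in full; the proofs are below) =====
def Claim_equal_numeric_keypad : Prop := ∀ (code : String), Dom_numeric_keypad code → Pre_numeric_keypad code → Spec_numeric_keypad code (numeric_keypad code)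

-- ===== LEMMAS AND PROOFS =====

-- A's step appends to the carried string and its new position depends only on the key
theorem pvStepA_append (s : List Char) (p : Int × Int) (k : Char) :
    pvStepA (s, p) k = (s ++ (pvStepA ([], p) k).1, (pvStepA ([], p) k).2) := by
  simp only [pvStepA]
  split_ifs <;> simp

-- per-transition agreement: A's emitted run equals B's sorted move bag, and positions track keys
set_option maxRecDepth 20000 in
theorem pvStep_emit_eq : ∀ a ∈ pvKeys, ∀ b ∈ pvKeys,
    (pvStepA ([], (pvPositionsA.get? a).getD (0, 0)) b).1 = pvWalkB a b
    ∧ (pvStepA ([], (pvPositionsA.get? a).getD (0, 0)) b).2 = (pvPositionsA.get? b).getD (0, 0) := by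
  intro a ha b hb
  simp only [pvKeys, List.mem_cons, List.not_mem_nil, or_false] at ha hb
  rcases ha with rfl|rfl|rfl|rfl|rfl|rfl|rfl|rfl|rfl|rfl|rfl <;>
    rcases hb with rfl|rfl|rfl|rfl|rfl|rfl|rfl|rfl|rfl|rfl|rfl <;> decide

-- A's fold only appends to the carried string
theorem pvFoldA_acc (l : List Char) : ∀ (s : List Char) (p : Int × Int),
    (l.foldl pvStepA (s, p)).1 = s ++ (l.foldl pvStepA ([], p)).1 := by
  induction l with
  | nil => simp
  | cons c l ih =>
    intro s p
    simp only [List.foldl_cons]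
    rw [pvStepA_append, ih, ih (pvStepA ([], p) c).1]
    simp

theorem pvFold_eq (l : List Char) : (∀ c ∈ l, c ∈ pvKeys) → ∀ a ∈ pvKeys,
    (l.foldl pvStepA ([], (pvPositionsA.get? a).getD (0, 0))).1
      = (((a :: l).zip l).map (fun pr => pvWalkB pr.1 pr.2)).flatten := by
  induction l with
  | nil => intros; simp
  | cons b l ih =>
    intro hl a ha
    have hb : b ∈ pvKeys := hl b (by simp)
    obtain ⟨h1, h2⟩ := pvStep_emit_eq a ha b hb
    simp only [List.foldl_cons, List.zip_cons_cons, List.map_cons, List.flatten_cons]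
    rw [pvStepA_append, h1, h2, pvFoldA_acc]
    rw [ih (fun c hc => hl c (by simp [hc])) b hb]
    simp

-- ===== VERDICT (by name: the statement is the Claim_ definition above) =====
theorem numeric_keypad_spec : Claim_equal_numeric_keypad := by
  intro code _ hpre
  unfold Pre_numeric_keypad at hpre
  rw [List.all_eq_true] at hpre
  unfold Spec_numeric_keypad numeric_keypad numeric_keypad_alt
  rw [pvFold_eq code.toList (fun c hc => by simpa using hpre c hc) 'A' (by decide)]
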